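-- pv_equiv track=rewrite | github.com/jieyu166/spine-image | convert_pkl_to_contour.py | detect_spine_type
-- ===== SOURCE A (Python) =====
-- def detect_spine_type(vertebra_names):
--     """從椎體名稱推斷 spine type"""
--     names_upper = [n.upper() for n in vertebra_names]
--     has_l = any(n.startswith('L') for n in names_upper)
--     has_c = any(n.startswith('C') for n in names_upper)
--     has_s = any(n.startswith('S') for n in names_upper)
--     has_t12 = 'T12' in names_upper
--
--     if has_l or has_s or has_t12:
--         return 'L'
--     if has_c:
--         return 'C'
--     return 'L'
-- ===== SOURCE B (Python) =====
-- def detect_spine_type(vertebra_names):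
--     """從椎體名稱推斷 spine type"""
--     has_c = False
--     for n in vertebra_names:
--         u = n.upper()
--         if u.startswith('L') or u.startswith('S') or u == 'T12':
--             return 'L'
--         if u.startswith('C'):
--             has_c = True
--     return 'C' if has_c else 'L'
-- ===== Notes on version B (the rewrite author's own statement) =====
-- stated objective: simpler
-- what changed: Replaced four separate passes (a map comprehension, three any() scans, a membership test) by one short-circuiting loop that uppercases each name once, returns 'L' immediately on an L/S prefix or 'T12', and otherwise tracks whether a C was seen.
import Mathlib
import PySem

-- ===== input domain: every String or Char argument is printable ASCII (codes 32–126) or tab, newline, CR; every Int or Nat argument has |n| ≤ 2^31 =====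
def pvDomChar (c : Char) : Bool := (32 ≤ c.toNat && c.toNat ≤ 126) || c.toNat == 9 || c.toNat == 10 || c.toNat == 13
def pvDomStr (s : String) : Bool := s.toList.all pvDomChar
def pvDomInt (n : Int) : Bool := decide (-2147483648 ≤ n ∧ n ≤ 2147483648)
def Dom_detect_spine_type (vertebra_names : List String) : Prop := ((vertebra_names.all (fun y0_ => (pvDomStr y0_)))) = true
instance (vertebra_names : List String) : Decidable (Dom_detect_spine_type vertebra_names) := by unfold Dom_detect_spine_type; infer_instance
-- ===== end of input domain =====

-- B replaces A's four independent scans by one short-circuiting loop; objective: simpler.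

-- ===== PORT A =====
def detect_spine_type (vertebra_names : List String) : String :=
  let names_upper := vertebra_names.map PySem.Str.upper
  let has_l := names_upper.any (fun n => PySem.Str.startswith n "L")
  let has_c := names_upper.any (fun n => PySem.Str.startswith n "C")
  let has_s := names_upper.any (fun n => PySem.Str.startswith n "S")
  let has_t12 := names_upper.contains "T12"
  if has_l || has_s || has_t12 then "L"
  else if has_c then "C"
  else "L"

-- ===== PORT B =====
def detect_spine_type_alt_go (names : List String) (has_c : Bool) : String :=
  match names with
  | [] => if has_c then "C" else "L"
  | n :: rest =>
    let u := PySem.Str.upper n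
    if PySem.Str.startswith u "L" || PySem.Str.startswith u "S" || u == "T12" then "L"
    else if PySem.Str.startswith u "C" then detect_spine_type_alt_go rest true
    else detect_spine_type_alt_go rest has_c

def detect_spine_type_alt (vertebra_names : List String) : String :=
  detect_spine_type_alt_go vertebra_names false

-- ===== PRECONDITION & SPEC =====
def Spec_detect_spine_type (vertebra_names : List String) (out : String) : Prop := out = detect_spine_type_alt vertebra_names
instance (vertebra_names : List String) (out : String) : Decidable (Spec_detect_spine_type vertebra_names out) := by unfold Spec_detect_spine_type; infer_instance

-- ===== CLAIM (what is proved, stated in full; the proofs are below) =====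
def Claim_equal_detect_spine_type : Prop := ∀ (vertebra_names : List String), Dom_detect_spine_type vertebra_names → Spec_detect_spine_type vertebra_names (detect_spine_type vertebra_names)

-- ===== LEMMAS AND PROOFS =====

-- characterisation of B's loop in terms of A's four scans
set_option maxHeartbeats 1000000 in
theorem alt_go_eq (names : List String) (has_c : Bool) :
    detect_spine_type_alt_go names has_c =
      (let nu := names.map PySem.Str.upper
       if nu.any (fun n => PySem.Str.startswith n "L")
          || nu.any (fun n => PySem.Str.startswith n "S")
          || nu.contains "T12" then "L"
       else if has_c || nu.any (fun n => PySem.Str.startswith n "C") then "C"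
       else "L") := by
  induction names generalizing has_c with
  | nil => simp [detect_spine_type_alt_go]
  | cons n rest ih =>
    simp only [detect_spine_type_alt_go, List.map_cons, List.any_cons, List.contains_cons]
    rw [show ("T12" == PySem.Str.upper n) = (PySem.Str.upper n == "T12") from
      Bool.eq_iff_iff.mpr (by simp [BEq.comm])] <;>
    cases hL : PySem.Str.startswith (PySem.Str.upper n) "L" <;>
    cases hS : PySem.Str.startswith (PySem.Str.upper n) "S" <;>
    cases hT : (PySem.Str.upper n == "T12") <;>
    by_cases hC : PySem.Str.startswith (PySem.Str.upper n) "C" = true <;>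
    simp only [ih, hC,
      Bool.false_or, Bool.true_or, Bool.or_true, Bool.or_false, if_true, if_false,
      Bool.or_assoc] <;> simp

-- ===== VERDICT (by name: the statement is the Claim_ definition above) =====
theorem detect_spine_type_spec : Claim_equal_detect_spine_type := by
  intro xs _
  unfold Spec_detect_spine_type detect_spine_type detect_spine_type_alt
  rw [alt_go_eq]
  simp only [Bool.false_or]
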